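-- pv_equiv track=rewrite | github.com/SanDollar03/CHUPPY_RAG_CONVERTER | app.py | split_chunks
-- ===== SOURCE A (Python) =====
-- from typing import Dict, List, Tuple, Optional, Any
--
-- DEFAULT_CHUNK_SEP = "***"
--
-- def split_chunks(md: str, chunk_sep: str) -> List[str]:
--     chunks: List[str] = []
--     buf: List[str] = []
--     sep = (chunk_sep or DEFAULT_CHUNK_SEP).strip()
--
--     for ln in (md or "").splitlines():
--         if ln.strip() == sep:
--             txt = "\n".join(buf).strip()
--             if txt:
--                 chunks.append(txt)
--             buf = []
--         else:
--             buf.append(ln)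
--
--     last = "\n".join(buf).strip()
--     if last:
--         chunks.append(last)
--     return chunks
-- ===== SOURCE B (Python) =====
-- from typing import List
--
-- DEFAULT_CHUNK_SEP = "***"
--
-- def split_chunks(md: str, chunk_sep: str) -> List[str]:
--     sep = (chunk_sep or DEFAULT_CHUNK_SEP).strip()
--     lines = (md or "").splitlines()
--     bounds = [i for i, ln in enumerate(lines) if ln.strip() == sep]
--     chunks: List[str] = []
--     prev = 0
--     for b in bounds + [len(lines)]:
--         txt = "\n".join(lines[prev:b]).strip()
--         if txt:
--             chunks.append(txt)
--         prev = b + 1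
--     return chunks
-- ===== Notes on version B (the rewrite author's own statement) =====
-- stated objective: alternative
-- what changed: Replaces A's interleaved buffer-and-flush accumulator loop with a two-phase decomposition: first collect the indices of separator lines, then slice the line list between consecutive boundaries, joining/stripping each slice and keeping the non-empty ones.
import Mathlib
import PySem

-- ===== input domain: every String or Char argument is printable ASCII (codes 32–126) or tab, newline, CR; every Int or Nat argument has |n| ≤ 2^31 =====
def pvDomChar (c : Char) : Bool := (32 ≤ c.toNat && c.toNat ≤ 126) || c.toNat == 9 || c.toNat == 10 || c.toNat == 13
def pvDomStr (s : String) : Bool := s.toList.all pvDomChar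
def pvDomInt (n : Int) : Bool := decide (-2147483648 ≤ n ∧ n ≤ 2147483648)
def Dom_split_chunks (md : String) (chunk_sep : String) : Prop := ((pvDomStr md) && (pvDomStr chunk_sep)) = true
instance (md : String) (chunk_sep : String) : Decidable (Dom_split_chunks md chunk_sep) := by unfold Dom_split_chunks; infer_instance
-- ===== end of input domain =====

-- B replaces A's interleaved buffer-and-flush loop by a two-phase pass: collect separator-line
-- indices, then slice between consecutive boundaries (alternative decomposition, same cost).

def DEFAULT_CHUNK_SEP : String := "***"

-- ===== PORT A =====
def split_chunks (md : String) (chunk_sep : String) : List String :=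
  let sep := PySem.Str.strip (if chunk_sep = "" then DEFAULT_CHUNK_SEP else chunk_sep)
  let st := (PySem.Str.splitlines (if md = "" then "" else md)).foldl
    (fun (st : List String × List String) ln =>
      if PySem.Str.strip ln = sep then
        let txt := PySem.Str.strip (PySem.Str.join "\n" st.2)
        (if txt ≠ "" then st.1 ++ [txt] else st.1, [])
      else (st.1, st.2 ++ [ln])) ([], [])
  let last := PySem.Str.strip (PySem.Str.join "\n" st.2)
  if last ≠ "" then st.1 ++ [last] else st.1

-- ===== PORT B =====
def split_chunks_alt (md : String) (chunk_sep : String) : List String :=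
  let sep := PySem.Str.strip (if chunk_sep = "" then DEFAULT_CHUNK_SEP else chunk_sep)
  let lines := PySem.Str.splitlines (if md = "" then "" else md)
  let bounds := (PySem.List.enumerate lines 0).filterMap
    (fun p => if PySem.Str.strip p.2 = sep then some p.1 else none)
  let st := (bounds ++ [(lines.length : Int)]).foldl
    (fun (st : List String × Int) b =>
      let txt := PySem.Str.strip (PySem.Str.join "\n" (PySem.List.slice lines (some st.2) (some b)))
      (if txt ≠ "" then st.1 ++ [txt] else st.1, b + 1)) ([], 0)
  st.1

-- ===== PRECONDITION & SPEC =====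
def Spec_split_chunks (md : String) (chunk_sep : String) (out : List String) : Prop := out = split_chunks_alt md chunk_sep
instance (md : String) (chunk_sep : String) (out : List String) : Decidable (Spec_split_chunks md chunk_sep out) := by unfold Spec_split_chunks; infer_instance

-- ===== CLAIM (what is proved, stated in full; the proofs are below) =====
def Claim_equal_split_chunks : Prop := ∀ (md : String) (chunk_sep : String), Dom_split_chunks md chunk_sep → Spec_split_chunks md chunk_sep (split_chunks md chunk_sep)

-- ===== LEMMAS AND PROOFS =====

-- canonical segment list: lines between separator lines
def pvSegs (sep : String) : List String → List (List String)
  | [] => [[]]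
  | l :: ls =>
    if PySem.Str.strip l = sep then [] :: pvSegs sep ls
    else match pvSegs sep ls with
      | [] => [[l]]
      | h :: t => (l :: h) :: t

def pvEmit (s : List String) : Option String :=
  let t := PySem.Str.strip (PySem.Str.join "\n" s)
  if t ≠ "" then some t else none

def pvConsHd (buf : List String) : List (List String) → List (List String)
  | [] => [buf]
  | h :: t => (buf ++ h) :: t

lemma pvSegs_ne_nil (sep : String) (ls : List String) : pvSegs sep ls ≠ [] := by
  cases ls with
  | nil => simp [pvSegs]
  | cons l ls =>
    simp only [pvSegs]
    split
    · simp
    · split <;> simp_all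

lemma pvConsHd_nil (segs : List (List String)) (h : segs ≠ []) : pvConsHd [] segs = segs := by
  cases segs with
  | nil => exact absurd rfl h
  | cons a t => simp [pvConsHd]

-- A's loop computes the emitted segments
lemma lemA (sep : String) : ∀ (ls : List String) (cs buf : List String),
    (let st := ls.foldl
      (fun (st : List String × List String) ln =>
        if PySem.Str.strip ln = sep then
          let txt := PySem.Str.strip (PySem.Str.join "\n" st.2)
          (if txt ≠ "" then st.1 ++ [txt] else st.1, [])
        else (st.1, st.2 ++ [ln])) (cs, buf)
     let last := PySem.Str.strip (PySem.Str.join "\n" st.2)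
     if last ≠ "" then st.1 ++ [last] else st.1)
    = cs ++ (pvConsHd buf (pvSegs sep ls)).filterMap pvEmit := by
  intro ls
  induction ls with
  | nil =>
    intro cs buf
    simp only [List.foldl_nil, pvSegs, pvConsHd, List.filterMap, pvEmit]
    split <;> simp_all
  | cons l ls ih =>
    intro cs buf
    simp only [List.foldl_cons]
    by_cases hp : PySem.Str.strip l = sep
    · simp only [hp, if_true, pvSegs]
      by_cases ht : PySem.Str.strip (PySem.Str.join "\n" buf) ≠ ""
      · simp only [if_pos ht]
        rw [ih (cs ++ [PySem.Str.strip (PySem.Str.join "\n" buf)]) []]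
        rw [pvConsHd_nil _ (pvSegs_ne_nil sep ls)]
        simp [pvConsHd, pvEmit, ht, List.append_assoc]
      · simp only [if_neg ht]
        rw [ih cs []]
        rw [pvConsHd_nil _ (pvSegs_ne_nil sep ls)]
        simp [pvConsHd, pvEmit, ht]
    · simp only [hp, if_false]
      rw [ih cs (buf ++ [l])]
      simp only [pvSegs, hp, if_false]
      rcases hne : pvSegs sep ls with _ | ⟨h, t⟩
      · exact absurd hne (pvSegs_ne_nil sep ls)
      · simp [pvConsHd, List.append_assoc]

-- boundary indices of a suffix, with an offset
def pvBounds (sep : String) (k : Int) (ls : List String) : List Int :=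
  (PySem.List.enumerate ls k).filterMap
    (fun p => if PySem.Str.strip p.2 = sep then some p.1 else none)

lemma pvBounds_nil (sep : String) (k : Int) : pvBounds sep k [] = [] := by
  simp [pvBounds, PySem.List.enumerate_nil]

lemma pvBounds_cons (sep : String) (k : Int) (l : String) (ls : List String) :
    pvBounds sep k (l :: ls)
      = (if PySem.Str.strip l = sep then [k] else []) ++ pvBounds sep (k + 1) ls := by
  simp only [pvBounds, PySem.List.enumerate_cons, List.filterMap_cons]
  split <;> simp_all

-- B's boundary fold computes the emitted segments of the remaining suffix
lemma lemB (sep : String) (lines : List String) : ∀ (ls : List String) (prev : Nat) (buf out : List String),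
    lines.drop prev = buf ++ ls →
    ((pvBounds sep ((prev + buf.length : Nat) : Int) ls ++ [(lines.length : Int)]).foldl
      (fun (st : List String × Int) b =>
        let txt := PySem.Str.strip (PySem.Str.join "\n" (PySem.List.slice lines (some st.2) (some b)))
        (if txt ≠ "" then st.1 ++ [txt] else st.1, b + 1)) (out, (prev : Int))).1
    = out ++ (pvConsHd buf (pvSegs sep ls)).filterMap pvEmit := by
  intro ls
  induction ls with
  | nil =>
    intro prev buf out hdrop
    rw [List.append_nil] at hdrop
    have hlen : lines.length - prev = buf.length := by
      simpa using congrArg List.length hdrop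
    have hb : PySem.List.slice lines (some (prev : Int)) (some (lines.length : Int))
        = buf := by
      rw [PySem.List.slice_natCast, hdrop, hlen]
      simp
    simp only [pvBounds_nil, List.nil_append, List.foldl_cons, List.foldl_nil, hb,
      pvSegs, pvConsHd, List.filterMap, pvEmit]
    split <;> simp_all
  | cons l ls ih =>
    intro prev buf out hdrop
    by_cases hp : PySem.Str.strip l = sep
    · rw [pvBounds_cons]
      simp only [hp, if_true, List.cons_append, List.foldl_cons]
      have hb : PySem.List.slice lines (some (prev : Int)) (some ((prev + buf.length : Nat) : Int))
          = buf := by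
        rw [PySem.List.slice_natCast]
        have h1 : (prev + buf.length) - prev = buf.length := by omega
        rw [h1, hdrop]
        simp
      have hdrop' : lines.drop (prev + buf.length + 1) = ls := by
        have h0 : lines.drop (prev + buf.length) = l :: ls := by
          rw [← List.drop_drop, hdrop]
          simp
        have h1 := congrArg (List.drop 1) h0
        rw [List.drop_drop] at h1
        simpa [Nat.add_comm] using h1
      simp only [hb]
      rw [show ((prev + buf.length : Nat) : Int) + 1 = ((prev + buf.length + 1 : Nat) : Int) by push_cast; ring]
      simp only [pvSegs, hp, if_true]
      by_cases ht : PySem.Str.strip (PySem.Str.join "\n" buf) ≠ ""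
      · rw [if_pos ht]
        have key := ih (prev + buf.length + 1) []
          (out ++ [PySem.Str.strip (PySem.Str.join "\n" buf)]) (by simpa using hdrop')
        simp only [List.length_nil, Nat.add_zero] at key
        rw [pvConsHd_nil _ (pvSegs_ne_nil sep ls)] at key
        simp only [List.nil_append]
        rw [key]
        simp [pvConsHd, pvEmit, ht, List.append_assoc]
      · rw [if_neg ht]
        have key := ih (prev + buf.length + 1) [] out (by simpa using hdrop')
        simp only [List.length_nil, Nat.add_zero] at key
        rw [pvConsHd_nil _ (pvSegs_ne_nil sep ls)] at key
        simp only [List.nil_append]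
        rw [key]
        simp [pvConsHd, pvEmit, ht]
    · rw [pvBounds_cons]
      simp only [hp, if_false, List.nil_append]
      have key := ih prev (buf ++ [l]) out (by simpa using hdrop)
      have hlen : ((prev + buf.length : Nat) : Int) + 1 = ((prev + (buf ++ [l]).length : Nat) : Int) := by
        simp
        ring
      rw [hlen] at *
      rw [key]
      simp only [pvSegs, hp, if_false]
      rcases hne : pvSegs sep ls with _ | ⟨h, t⟩
      · exact absurd hne (pvSegs_ne_nil sep ls)
      · simp [pvConsHd, List.append_assoc]

-- ===== VERDICT (by name: the statement is the Claim_ definition above) =====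
theorem split_chunks_spec : Claim_equal_split_chunks := by
  intro md chunk_sep _
  unfold Spec_split_chunks split_chunks split_chunks_alt
  set sep := PySem.Str.strip (if chunk_sep = "" then DEFAULT_CHUNK_SEP else chunk_sep) with hsep
  set lines := PySem.Str.splitlines (if md = "" then "" else md) with hlines
  have hA := lemA sep lines [] []
  simp only [List.nil_append] at hA
  have hB := lemB sep lines lines 0 [] [] (by simp)
  simp only [List.length_nil, Nat.add_zero, Nat.cast_zero, List.nil_append] at hB
  rw [hA, pvConsHd_nil _ (pvSegs_ne_nil sep lines)]
  simp only [pvBounds] at hB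
  rw [hB, pvConsHd_nil _ (pvSegs_ne_nil sep lines)]
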